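-- pv_equiv track=rewrite | github.com/prrrathm/UG | Sem3/Python/final/Q2.py | arrangeString
-- ===== SOURCE A (Python) =====
-- def arrangeString(a):
--     lower = ''
--     upper = ''
--     for i in a:
--         if i != ' ':
--             if i.islower():
--                 lower = lower+i
--             else:
--                 upper = upper+i
--     return lower+upper
-- ===== SOURCE B (Python) =====
-- def arrangeString(a):
--     lower = ''.join(c for c in a if c != ' ' and c.islower())
--     upper = ''.join(c for c in a if c != ' ' and not c.islower())
--     return lower + upper
-- ===== Notes on version B (the rewrite author's own statement) =====
-- stated objective: simpler
-- what changed: Replaces A's single branching loop with two mutable string accumulators by two independent filtering passes joined at the end.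
import Mathlib
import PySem

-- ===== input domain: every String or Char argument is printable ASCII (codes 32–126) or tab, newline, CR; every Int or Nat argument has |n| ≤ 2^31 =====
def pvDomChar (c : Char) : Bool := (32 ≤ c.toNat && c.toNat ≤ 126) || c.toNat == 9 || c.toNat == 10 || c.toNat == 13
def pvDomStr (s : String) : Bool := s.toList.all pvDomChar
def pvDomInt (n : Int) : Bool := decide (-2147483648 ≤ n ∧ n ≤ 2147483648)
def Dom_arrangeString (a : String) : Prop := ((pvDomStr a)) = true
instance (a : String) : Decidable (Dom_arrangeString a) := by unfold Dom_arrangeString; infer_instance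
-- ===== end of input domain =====

-- B builds the two buckets by two independent filtering passes instead of A's single branching loop; objective: simpler.


-- ===== PORT A =====
-- one loop over the characters, appending each non-space char to `lower` or `upper`
def arrangeString (a : String) : String :=
  let p := a.toList.foldl
    (fun (s : String × String) i =>
      if i != ' ' then
        if PySem.Str.islower i then (s.1 ++ String.ofList [i], s.2)
        else (s.1, s.2 ++ String.ofList [i])
      else s)
    ("", "")
  p.1 ++ p.2

-- ===== PORT B =====
-- two independent filtering passes, joined at the end
def arrangeString_alt (a : String) : String :=
  String.ofList (a.toList.filter (fun c => c != ' ' && PySem.Str.islower c)) ++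
  String.ofList (a.toList.filter (fun c => c != ' ' && !PySem.Str.islower c))

-- ===== PRECONDITION & SPEC =====
def Spec_arrangeString (a : String) (out : String) : Prop := out = arrangeString_alt a
instance (a : String) (out : String) : Decidable (Spec_arrangeString a out) := by unfold Spec_arrangeString; infer_instance

-- ===== CLAIM (what is proved, stated in full; the proofs are below) =====
def Claim_equal_arrangeString : Prop := ∀ (a : String), Dom_arrangeString a → Spec_arrangeString a (arrangeString a)

-- ===== LEMMAS AND PROOFS =====
theorem arrangeString_loop (l : List Char) (s1 s2 : String) :
    l.foldl
      (fun (s : String × String) i =>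
        if i != ' ' then
          if PySem.Str.islower i then (s.1 ++ String.ofList [i], s.2)
          else (s.1, s.2 ++ String.ofList [i])
        else s)
      (s1, s2)
    = (s1 ++ String.ofList (l.filter (fun c => c != ' ' && PySem.Str.islower c)),
       s2 ++ String.ofList (l.filter (fun c => c != ' ' && !PySem.Str.islower c))) := by
  induction l generalizing s1 s2 with
  | nil =>
    simp only [List.foldl_nil, List.filter_nil]
    refine Prod.ext ?_ ?_ <;> exact (String.ext (by simp)).symm
  | cons c l ih =>
    rw [List.foldl_cons, List.filter_cons, List.filter_cons]
    by_cases hsp : (c != ' ') = true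
    · by_cases hlo : PySem.Str.islower c = true
      · simp only [hsp, hlo, if_true, Bool.and_true, Bool.not_true, Bool.and_false, ih]
        refine Prod.ext ?_ ?_ <;> exact String.ext (by simp)
      · simp only [Bool.not_eq_true] at hlo
        simp only [hsp, hlo, if_true, Bool.and_false, Bool.not_false, Bool.and_true, ih]
        refine Prod.ext ?_ ?_ <;> exact String.ext (by simp)
    · simp only [Bool.not_eq_true] at hsp
      simp only [hsp, Bool.false_and, ih]
      simp

-- ===== VERDICT (by name: the statement is the Claim_ definition above) =====
theorem arrangeString_spec : Claim_equal_arrangeString := by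
  intro a _
  unfold Spec_arrangeString arrangeString arrangeString_alt
  rw [arrangeString_loop]
  simp
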